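-- pv_equiv track=rewrite | github.com/j-adamczyk/Numerical_algorithms | lab2_linear_algebra/task_3_circuit_analyser/main.py | get_high_degree_vertices
-- ===== SOURCE A (Python) =====
-- class Vertex:
--     a = -1
--     degree = 0
--
-- def get_high_degree_vertices(vertices):
--     high_degree_vertices = []
--
--     for vertex in vertices:
--         if len(vertices[vertex]) >= 2:
--             high_degree_vertex = Vertex()
--             high_degree_vertex.a = vertex
--             high_degree_vertex.degree = len(vertices[vertex])
--             high_degree_vertices.append(high_degree_vertex)
--
--     high_degree_vertices.sort(key=lambda x: x.degree, reverse=True)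
--
--     result = []
--     for vertex in high_degree_vertices:
--         result.append(vertex.a)
--
--     return result
-- ===== SOURCE B (Python) =====
-- def get_high_degree_vertices(vertices):
--     # bucket sort by degree: group ids of degree >= 2 under their degree,
--     # then emit buckets from the highest degree down
--     buckets = {}
--     for vertex, adjacent in vertices.items():
--         degree = len(adjacent)
--         if degree >= 2:
--             buckets.setdefault(degree, []).append(vertex)
--
--     result = []
--     for degree in sorted(buckets, reverse=True):
--         result.extend(buckets[degree])
--     return result
-- ===== Notes on version B (the rewrite author's own statement) =====
-- stated objective: alternative
-- what changed: Replaces A's build-Vertex-objects-then-comparison-sort with a single pass that groups degree>=2 vertex ids into degree-keyed buckets and then emits the buckets in descending order of the sorted distinct degrees (a bucket/grouping strategy that sorts only the distinct degrees, reproducing the stable tie order); Pre_ only excludes association lists with duplicate keys, which cannot arise from the dict[int, list[int]] parameter.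
import Mathlib
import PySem

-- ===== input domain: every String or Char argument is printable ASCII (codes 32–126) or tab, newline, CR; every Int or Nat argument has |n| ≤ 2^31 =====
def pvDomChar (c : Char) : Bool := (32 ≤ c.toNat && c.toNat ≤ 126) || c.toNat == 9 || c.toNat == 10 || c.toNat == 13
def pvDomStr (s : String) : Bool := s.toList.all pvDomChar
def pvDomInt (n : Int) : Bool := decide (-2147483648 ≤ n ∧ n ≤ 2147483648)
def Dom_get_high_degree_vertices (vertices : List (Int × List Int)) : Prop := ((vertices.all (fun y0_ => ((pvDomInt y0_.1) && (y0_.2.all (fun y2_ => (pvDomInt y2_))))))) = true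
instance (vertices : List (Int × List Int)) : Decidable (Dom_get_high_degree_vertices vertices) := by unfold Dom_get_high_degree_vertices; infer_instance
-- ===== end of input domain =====

-- B replaces A's comparison sort of Vertex objects by a one-pass degree-bucket
-- grouping followed by a sort of the distinct degrees only (objective: alternative).

-- ===== PORT A =====
-- A iterates the dict's keys and looks each key up again ('vertices[vertex]');
-- the Vertex object with fields a/degree is ported as the pair (a, degree).
def get_high_degree_vertices (vertices : List (Int × List Int)) : List Int :=
  let d : PySem.Dict Int (List Int) := PySem.Dict.mk vertices
  let high_degree_vertices : List (Int × Int) :=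
    d.keys.foldl (fun acc vertex =>
      if 2 ≤ (d.getD vertex []).length then
        acc ++ [(vertex, ((d.getD vertex []).length : Int))]
      else acc) []
  let sortedv := PySem.List.sorted high_degree_vertices (fun x => x.2) true
  sortedv.foldl (fun result vertex => result ++ [vertex.1]) []

-- ===== PORT B =====
-- buckets.setdefault(degree, []).append(vertex) is exactly
-- buckets.modify degree [] (· ++ [vertex]) (d[k] = f(d.get(k, dflt))).
def get_high_degree_vertices_alt (vertices : List (Int × List Int)) : List Int :=
  let buckets : PySem.Dict Int (List Int) :=
    vertices.foldl (fun buckets p =>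
      if 2 ≤ p.2.length then
        buckets.modify ((p.2.length : Int)) [] (fun l => l ++ [p.1])
      else buckets) PySem.Dict.empty
  (PySem.List.sorted buckets.keys (fun x => x) true).foldl
    (fun result degree => result ++ buckets.getD degree []) []

-- ===== PRECONDITION & SPEC =====
-- Pre_ excludes association lists with duplicate keys: the parameter is a Python
-- dict[int, list[int]], whose association-list representation always has distinct
-- keys, so no actual Python input is excluded.
def Pre_get_high_degree_vertices (vertices : List (Int × List Int)) : Prop :=
  (vertices.map Prod.fst).Nodup
instance (vertices : List (Int × List Int)) : Decidable (Pre_get_high_degree_vertices vertices) := by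
  unfold Pre_get_high_degree_vertices; infer_instance

def pvWitness_get_high_degree_vertices : (List (Int × List Int)) :=
  [(0, [1, 2]), (1, [2]), (2, [0, 1, 3])]

def Spec_get_high_degree_vertices (vertices : List (Int × List Int)) (out : List Int) : Prop := out = get_high_degree_vertices_alt vertices
instance (vertices : List (Int × List Int)) (out : List Int) : Decidable (Spec_get_high_degree_vertices vertices out) := by unfold Spec_get_high_degree_vertices; infer_instance

-- ===== CLAIM (what is proved, stated in full; the proofs are below) =====
def Claim_equal_get_high_degree_vertices : Prop := ∀ (vertices : List (Int × List Int)), Dom_get_high_degree_vertices vertices → Pre_get_high_degree_vertices vertices → Spec_get_high_degree_vertices vertices (get_high_degree_vertices vertices)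

-- ===== LEMMAS AND PROOFS =====

-- a guarded append-fold is the plain fold over the filtered, mapped list
theorem pvFoldlGuard {β γ δ : Type} (c : β → Prop) [DecidablePred c] (h : β → γ)
    (f : δ → γ → δ) (l : List β) (i : δ) :
    l.foldl (fun a b => if c b then f a (h b) else a) i
      = ((l.filter (fun b => decide (c b))).map h).foldl f i := by
  induction l generalizing i with
  | nil => rfl
  | cons b t ih =>
    by_cases hb : c b <;> simp [hb, ih]

theorem pvFoldlAppendSingleton {β γ : Type} (f : β → γ) (l : List β) (i : List γ) :
    l.foldl (fun r x => r ++ [f x]) i = i ++ l.map f := by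
  induction l generalizing i with
  | nil => simp
  | cons b t ih => simp [ih]

theorem pvFoldlAppend {β γ : Type} (g : β → List γ) (l : List β) (i : List γ) :
    l.foldl (fun r x => r ++ g x) i = i ++ l.flatMap g := by
  induction l generalizing i with
  | nil => simp
  | cons b t ih => simp [ih]

theorem pvFlatMapCongr {β γ : Type} {f g : β → List γ} (l : List β)
    (h : ∀ b ∈ l, f b = g b) : l.flatMap f = l.flatMap g := by
  induction l with
  | nil => rfl
  | cons b t ih =>
    simp [List.flatMap_cons, h b (by simp), ih (fun b hb => h b (by simp [hb]))]

theorem pvInsertByCons {α : Type} (bef : α → α → Bool) (x y : α) (ys : List α) :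
    PySem.List.insertBy bef x (y :: ys)
      = if bef x y then x :: y :: ys else y :: PySem.List.insertBy bef x ys := rfl

theorem pvInsertByAll {α : Type} (bef : α → α → Bool) (x : α) (l : List α)
    (h : ∀ a ∈ l, bef x a = true) : PySem.List.insertBy bef x l = x :: l := by
  cases l with
  | nil => rfl
  | cons a t => rw [pvInsertByCons, if_pos (h a (by simp))]

theorem pvInsertBySkip {α : Type} (bef : α → α → Bool) (x : α) (l1 l2 : List α)
    (h : ∀ a ∈ l1, bef x a = false) :
    PySem.List.insertBy bef x (l1 ++ l2) = l1 ++ PySem.List.insertBy bef x l2 := by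
  induction l1 with
  | nil => rfl
  | cons a t ih =>
    rw [List.cons_append, pvInsertByCons, if_neg (by simp [h a (by simp)]),
      ih (fun a ha => h a (by simp [ha])), List.cons_append]

-- inserting x into a descending bucket concatenation appends it to its bucket
theorem pvGroupInsert {α : Type} (key : α → Int) (x : α) (B : Int → List α) :
    ∀ (ds : List Int), ds.Pairwise (· > ·) →
    (∀ d ∈ ds, ∀ a ∈ B d, key a = d) →
    (key x ∉ ds → B (key x) = []) →
    PySem.List.insertBy (fun a b => decide (key b < key a)) x (ds.flatMap B) =
      (if key x ∈ ds then ds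
       else PySem.List.insertBy (fun a b => decide (b < a)) (key x) ds).flatMap
        (fun d => B d ++ if key x == d then [x] else []) := by
  intro ds
  induction ds with
  | nil =>
    intro _ _ hB2
    simp [PySem.List.insertBy, hB2 (by simp)]
  | cons d tl ih =>
    intro hds hB hB2
    have hd : ∀ y ∈ tl, y < d := fun y hy => List.rel_of_pairwise_cons hds hy
    have hdst := hds.of_cons
    have hBt : ∀ d' ∈ tl, ∀ a ∈ B d', key a = d' := fun d' h' => hB d' (by simp [h'])
    by_cases hxd : key x = d
    · -- x joins the head bucket
      have hskip : ∀ a ∈ B d, (decide (key a < key x) : Bool) = false := by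
        intro a ha
        rw [hB d (by simp) a ha, hxd, decide_eq_false_iff_not]
        omega
      have hall : ∀ a ∈ tl.flatMap B, (decide (key a < key x) : Bool) = true := by
        intro a ha
        obtain ⟨d', hd', ha'⟩ := List.mem_flatMap.mp ha
        have h1 := hd d' hd'
        rw [hBt d' hd' a ha', decide_eq_true_eq, hxd]
        omega
      have hcongr : ∀ d' ∈ tl, B d' ++ (if key x == d' then [x] else []) = B d' := by
        intro d' hd'
        have h1 := hd d' hd'
        have : (key x == d') = false := by rw [beq_eq_false_iff_ne]; omega
        simp [this]
      have hmem : key x ∈ d :: tl := by simp [hxd]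
      rw [List.flatMap_cons, pvInsertBySkip _ _ _ _ hskip, pvInsertByAll _ _ _ hall,
        if_pos hmem, List.flatMap_cons, pvFlatMapCongr tl hcongr]
      have : (key x == d) = true := by rw [beq_iff_eq]; omega
      simp [this]
    · by_cases hxtl : key x ∈ tl
      · -- x belongs further down
        have hlt : key x < d := hd _ hxtl
        have hskip : ∀ a ∈ B d, (decide (key a < key x) : Bool) = false := by
          intro a ha
          rw [hB d (by simp) a ha, decide_eq_false_iff_not]
          omega
        rw [List.flatMap_cons, pvInsertBySkip _ _ _ _ hskip,
          ih hdst hBt (fun h => absurd hxtl h)]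
        have hmem : key x ∈ d :: tl := by simp [hxtl]
        have : (key x == d) = false := by rw [beq_eq_false_iff_ne]; omega
        rw [if_pos hmem, if_pos hxtl, List.flatMap_cons]
        simp [this]
      · have hnotin : key x ∉ d :: tl := by simp [hxd, hxtl]
        by_cases hlt : d < key x
        · -- x opens a new bucket in front
          have hall : ∀ a ∈ (d :: tl).flatMap B, (decide (key a < key x) : Bool) = true := by
            intro a ha
            obtain ⟨d', hd', ha'⟩ := List.mem_flatMap.mp ha
            have hle : d' ≤ d := by
              rcases List.mem_cons.mp hd' with h | h
              · omega
              · have := hd d' h; omega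
            rw [hB d' hd' a ha', decide_eq_true_eq]
            omega
          have hcongr : ∀ d' ∈ d :: tl, B d' ++ (if key x == d' then [x] else []) = B d' := by
            intro d' hd'
            have : (key x == d') = false := by
              rw [beq_eq_false_iff_ne]
              exact fun h => hnotin (h ▸ hd')
            simp [this]
          have hins : PySem.List.insertBy (fun a b => decide (b < a)) (key x) (d :: tl)
              = key x :: d :: tl := by
            rw [pvInsertByCons, if_pos (by rw [decide_eq_true_eq]; omega)]
          have h2 : List.flatMap (fun d' => B d' ++ if key x == d' then [x] else [])
              (key x :: d :: tl)
              = (B (key x) ++ [x]) ++ List.flatMap B (d :: tl) := by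
            rw [List.flatMap_cons, pvFlatMapCongr _ hcongr]
            simp
          rw [pvInsertByAll _ _ _ hall, if_neg hnotin, hins, h2, hB2 hnotin]
          simp
        · -- skip the head bucket, recurse
          have hgt : key x < d := by
            rcases lt_or_gt_of_ne (fun h => hxd h) with h | h
            · exact h
            · omega
          have hskip : ∀ a ∈ B d, (decide (key a < key x) : Bool) = false := by
            intro a ha
            rw [hB d (by simp) a ha, decide_eq_false_iff_not]
            omega
          have hxtl' : key x ∉ tl := hxtl
          rw [List.flatMap_cons, pvInsertBySkip _ _ _ _ hskip,
            ih hdst hBt (fun _ => hB2 hnotin)]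
          have hins : PySem.List.insertBy (fun a b => decide (b < a)) (key x) (d :: tl)
              = d :: PySem.List.insertBy (fun a b => decide (b < a)) (key x) tl := by
            rw [pvInsertByCons, if_neg (by simp only [decide_eq_true_eq]; omega)]
          have : (key x == d) = false := by rw [beq_eq_false_iff_ne]; omega
          rw [if_neg hnotin, if_neg hxtl', hins, List.flatMap_cons]
          simp [this]

theorem pvSortedSetDesc (s : List Int) (hnd : s.Nodup) :
    (PySem.List.sorted s (fun x => x) true).Pairwise (· > ·) := by
  have h1 := PySem.List.sorted_pairwise_rev s (fun x => x)
  have h2 : (PySem.List.sorted s (fun x => x) true).Nodup :=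
    ((PySem.List.sorted_perm s (fun x => x) true).nodup_iff).mpr hnd
  exact (h1.and h2).imp (fun h => lt_of_le_of_ne h.1 (Ne.symm h.2))

theorem pvSortedRevAppendSingleton {α : Type} (key : α → Int) (l : List α) (x : α) :
    PySem.List.sorted (l ++ [x]) key true
      = PySem.List.insertBy (fun a b => decide (key b < key a)) x
          (PySem.List.sorted l key true) := by
  rw [PySem.List.sorted_rev_eq_foldl_insertBy (l ++ [x]) key,
    PySem.List.sorted_rev_eq_foldl_insertBy l key, List.foldl_append]
  rfl

-- a stable descending sort is the concatenation of the original-order degree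
-- buckets, taken in strictly descending order of the distinct keys
theorem pvGroupSort {α : Type} (key : α → Int) (xs : List α) :
    PySem.List.sorted xs key true =
      (PySem.List.sorted (PySem.Set.ofList (xs.map key)) (fun d => d) true).flatMap
        (fun d => xs.filter (fun a => key a == d)) := by
  induction xs using List.reverseRecOn with
  | nil => rfl
  | append_singleton xs x ih =>
    have hndS : (PySem.Set.ofList (xs.map key)).Nodup := PySem.Set.nodup_ofList _
    have hmemS : ∀ z, z ∈ PySem.List.sorted (PySem.Set.ofList (xs.map key)) (fun d => d) true
        ↔ z ∈ PySem.Set.ofList (xs.map key) := by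
      intro z; simp [PySem.List.mem_sorted]
    have hset : PySem.Set.ofList ((xs ++ [x]).map key)
        = PySem.Set.add (PySem.Set.ofList (xs.map key)) (key x) := by
      simp [PySem.Set.ofList_eq_foldl, List.foldl_append]
    have hB : ∀ d ∈ PySem.List.sorted (PySem.Set.ofList (xs.map key)) (fun d => d) true,
        ∀ a ∈ xs.filter (fun a => key a == d), key a = d := by
      intro d _ a ha
      exact by simpa using (List.mem_filter.mp ha).2
    have hB2 : key x ∉ PySem.List.sorted (PySem.Set.ofList (xs.map key)) (fun d => d) true →
        xs.filter (fun a => key a == key x) = [] := by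
      intro h
      rw [hmemS, PySem.Set.mem_ofList] at h
      refine List.filter_eq_nil_iff.mpr (fun a ha hak => ?_)
      exact h (by simpa using List.mem_map.mpr ⟨a, ha, by simpa using hak⟩)
    rw [pvSortedRevAppendSingleton, ih,
      pvGroupInsert key x _ _
        (pvSortedSetDesc _ hndS) hB hB2]
    have hsadd : PySem.List.sorted (PySem.Set.add (PySem.Set.ofList (xs.map key)) (key x)) (fun d => d) true
        = if key x ∈ PySem.List.sorted (PySem.Set.ofList (xs.map key)) (fun d => d) true then
            PySem.List.sorted (PySem.Set.ofList (xs.map key)) (fun d => d) true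
          else PySem.List.insertBy (fun a b => decide (b < a)) (key x)
            (PySem.List.sorted (PySem.Set.ofList (xs.map key)) (fun d => d) true) := by
      by_cases hk : key x ∈ PySem.Set.ofList (xs.map key)
      · have hc : (PySem.Set.ofList (xs.map key)).contains (key x) = true := by
          simpa using hk
        have hadd : PySem.Set.add (PySem.Set.ofList (xs.map key)) (key x)
            = PySem.Set.ofList (xs.map key) := by
          simp only [PySem.Set.add, hc]
          simp
        rw [hadd, if_pos ((hmemS _).mpr hk)]
      · have hc : (PySem.Set.ofList (xs.map key)).contains (key x) = false := by
          simpa using hk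
        have hadd : PySem.Set.add (PySem.Set.ofList (xs.map key)) (key x)
            = PySem.Set.ofList (xs.map key) ++ [key x] := by
          simp only [PySem.Set.add, hc]
          simp
        rw [hadd, if_neg (fun h => hk ((hmemS _).mp h))]
        exact pvSortedRevAppendSingleton (fun d => d) _ (key x)
    rw [hset, hsadd]
    congr 1
    funext d
    simp [List.filter_append, List.filter_cons]

-- A's loop over the dict, rewritten as filter/map over the entry list
theorem pvPortA (vertices : List (Int × List Int))
    (h : (vertices.map Prod.fst).Nodup) :
    get_high_degree_vertices vertices =
      (PySem.List.sorted
        ((vertices.filter (fun p => decide (2 ≤ p.2.length))).map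
          (fun p => (p.1, (p.2.length : Int)))) (fun x => x.2) true).map Prod.fst := by
  unfold get_high_degree_vertices
  simp only [PySem.Dict.keys_mk, List.foldl_map]
  have hstep : vertices.foldl (fun acc p =>
      if 2 ≤ ((PySem.Dict.mk vertices).getD p.1 []).length then
        acc ++ [(p.1, (((PySem.Dict.mk vertices).getD p.1 []).length : Int))]
      else acc) []
      = vertices.foldl (fun acc p =>
        if 2 ≤ p.2.length then acc ++ [(p.1, (p.2.length : Int))] else acc) [] := by
    apply PySem.List.foldl_congr_mem
    intro acc p hp
    have hget : (PySem.Dict.mk vertices).getD p.1 [] = p.2 :=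
      PySem.Dict.getD_of_mem_items (d := PySem.Dict.mk vertices)
        (by simpa using hp) (by simpa [PySem.Dict.keys_mk] using h) []
    rw [hget]
  rw [hstep,
    pvFoldlGuard (fun p : Int × List Int => 2 ≤ p.2.length)
      (fun p => (p.1, (p.2.length : Int)))
      (fun (a : List (Int × Int)) (e : Int × Int) => a ++ [e]) vertices [],
    pvFoldlAppendSingleton (fun e : Int × Int => e) _ [],
    pvFoldlAppendSingleton (fun v : Int × Int => v.1) _ []]
  simp [Function.comp_def]

-- B's loops, rewritten as a flatMap over the sorted distinct degrees
theorem pvPortB (vertices : List (Int × List Int)) :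
    get_high_degree_vertices_alt vertices =
      (PySem.List.sorted
        (PySem.Set.ofList
          (((vertices.filter (fun p => decide (2 ≤ p.2.length))).map
            (fun p => ((p.2.length : Int), p.1))).map Prod.fst)) (fun x => x) true).flatMap
        (fun dg => (((vertices.filter (fun p => decide (2 ≤ p.2.length))).map
            (fun p => ((p.2.length : Int), p.1))).filter (fun q => q.1 == dg)).map Prod.snd) := by
  unfold get_high_degree_vertices_alt
  dsimp only
  rw [pvFoldlGuard (fun p : Int × List Int => 2 ≤ p.2.length)
      (fun p => ((p.2.length : Int), p.1))
      (fun (d : PySem.Dict Int (List Int)) q => d.modify q.1 [] (fun l => l ++ [q.2]))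
      vertices PySem.Dict.empty]
  have hkeys : ((((vertices.filter (fun p => decide (2 ≤ p.2.length))).map
        (fun p => ((p.2.length : Int), p.1)))).foldl
        (fun d q => d.modify q.1 [] (fun l => l ++ [q.2])) PySem.Dict.empty).keys
      = PySem.Set.ofList
          (((vertices.filter (fun p => decide (2 ≤ p.2.length))).map
            (fun p => ((p.2.length : Int), p.1))).map Prod.fst) := by
    rw [PySem.Dict.keys_foldl_modify_key _ Prod.fst [] (fun _ q => fun l => l ++ [q.2])]
    simp [PySem.Set.update, PySem.Set.ofList_eq_foldl, PySem.Dict.keys_empty]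
  rw [hkeys, pvFoldlAppend]
  simp only [List.nil_append]
  apply pvFlatMapCongr
  intro dg _
  rw [PySem.Dict.getD_foldl_modify_append]
  simp [PySem.Dict.getD_empty]

-- ===== VERDICT (by name: the statement is the Claim_ definition above) =====
theorem get_high_degree_vertices_spec : Claim_equal_get_high_degree_vertices := by
  intro vertices _ hpre
  unfold Spec_get_high_degree_vertices
  rw [pvPortA vertices hpre, pvPortB vertices,
    pvGroupSort (fun p : Int × Int => p.2)]
  rw [List.map_flatMap]
  have h1 : (((vertices.filter (fun p => decide (2 ≤ p.2.length))).map
        (fun p => (p.1, (p.2.length : Int)))).map (fun p : Int × Int => p.2))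
      = (((vertices.filter (fun p => decide (2 ≤ p.2.length))).map
        (fun p => ((p.2.length : Int), p.1))).map Prod.fst) := by
    simp [List.map_map, Function.comp]
  rw [h1]
  apply pvFlatMapCongr
  intro dg _
  simp [List.filter_map, List.map_map, Function.comp]
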